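-- pv_equiv track=rewrite | github.com/leiferlab/wormneuronsegmentation-c | pyneuronsegmentation/_pyneuronsegmentation_py.py | curvatureConversion
-- ===== SOURCE A (Python) =====
-- def curvatureConversion(NeuronCurvature, NeuronNInVolume):
--     NeuronCurvatureVSplit = []
--     k = 0
--     for n in NeuronNInVolume:
--         n = int(n)
--         NeuronCurvatureVSplit.append(NeuronCurvature[k:k+n])
--         k += n
--
--     return NeuronCurvatureVSplit
-- ===== SOURCE B (Python) =====
-- def curvatureConversion(NeuronCurvature, NeuronNInVolume):
--     offsets = []
--     total = 0
--     for n in NeuronNInVolume: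
--         total += int(n)
--         offsets.append(total)
--     starts = [0] + offsets[:-1]
--     return [NeuronCurvature[s:e] for s, e in zip(starts, offsets)]
-- ===== Notes on version B (the rewrite author's own statement) =====
-- stated objective: alternative
-- what changed: Replaces the running-offset accumulator loop (threading k while appending slices) with a precompute-then-map decomposition: build the cumulative boundary table, pair adjacent boundaries with zip, and slice per pair.
import Mathlib
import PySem

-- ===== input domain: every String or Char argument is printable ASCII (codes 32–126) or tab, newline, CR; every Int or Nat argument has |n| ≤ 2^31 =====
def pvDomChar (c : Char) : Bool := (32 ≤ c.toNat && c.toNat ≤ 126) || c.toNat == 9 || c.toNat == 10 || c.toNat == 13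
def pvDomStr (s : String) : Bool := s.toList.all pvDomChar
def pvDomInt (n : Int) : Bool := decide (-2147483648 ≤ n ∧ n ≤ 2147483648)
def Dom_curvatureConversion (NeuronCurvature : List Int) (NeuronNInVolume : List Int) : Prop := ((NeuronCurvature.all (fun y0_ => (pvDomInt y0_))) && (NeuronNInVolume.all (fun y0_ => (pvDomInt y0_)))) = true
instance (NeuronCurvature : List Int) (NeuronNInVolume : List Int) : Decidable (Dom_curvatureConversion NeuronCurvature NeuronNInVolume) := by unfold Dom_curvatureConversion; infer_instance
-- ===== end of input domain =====

-- B replaces A's running-offset accumulator loop with a boundary-table + zip/slice map; same cost, different decomposition.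

-- ===== PORT A =====
-- A: single loop threading a running offset k, appending NeuronCurvature[k:k+n] each step.
def curvatureConversion (NeuronCurvature : List Int) (NeuronNInVolume : List Int) : List (List Int) :=
  (NeuronNInVolume.foldl
    (fun (st : List (List Int) × Int) n =>
      (st.1 ++ [PySem.List.slice NeuronCurvature (some st.2) (some (st.2 + n))], st.2 + n))
    ([], 0)).1

-- ===== PORT B =====
-- B: first build cumulative offsets, then starts = 0 :: offsets[:-1], then slice per zipped pair.
def curvatureConversion_alt (NeuronCurvature : List Int) (NeuronNInVolume : List Int) : List (List Int) :=
  let offsets := (NeuronNInVolume.foldl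
    (fun (st : List Int × Int) n => (st.1 ++ [st.2 + n], st.2 + n)) ([], 0)).1
  let starts := 0 :: PySem.List.slice offsets none (some (-1))
  (starts.zip offsets).map (fun p => PySem.List.slice NeuronCurvature (some p.1) (some p.2))

-- ===== PRECONDITION & SPEC =====
def Spec_curvatureConversion (NeuronCurvature : List Int) (NeuronNInVolume : List Int) (out : List (List Int)) : Prop := out = curvatureConversion_alt NeuronCurvature NeuronNInVolume
instance (NeuronCurvature : List Int) (NeuronNInVolume : List Int) (out : List (List Int)) : Decidable (Spec_curvatureConversion NeuronCurvature NeuronNInVolume out) := by unfold Spec_curvatureConversion; infer_instance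

-- ===== CLAIM (what is proved, stated in full; the proofs are below) =====
def Claim_equal_curvatureConversion : Prop := ∀ (NeuronCurvature : List Int) (NeuronNInVolume : List Int), Dom_curvatureConversion NeuronCurvature NeuronNInVolume → Spec_curvatureConversion NeuronCurvature NeuronNInVolume (curvatureConversion NeuronCurvature NeuronNInVolume)

-- ===== LEMMAS AND PROOFS =====

-- direct recursive characterisation of the per-volume slices starting at offset k
def pvGo (NC : List Int) : List Int → Int → List (List Int)
  | [], _ => []
  | n :: t, k => PySem.List.slice NC (some k) (some (k + n)) :: pvGo NC t (k + n)

-- the cumulative-offset table starting at k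
def pvOffs : List Int → Int → List Int
  | [], _ => []
  | n :: t, k => (k + n) :: pvOffs t (k + n)

theorem pvFoldA (NC : List Int) (NV : List Int) (acc : List (List Int)) (k : Int) :
    (NV.foldl
      (fun (st : List (List Int) × Int) n =>
        (st.1 ++ [PySem.List.slice NC (some st.2) (some (st.2 + n))], st.2 + n))
      (acc, k)).1 = acc ++ pvGo NC NV k := by
  induction NV generalizing acc k with
  | nil => simp [pvGo]
  | cons n t ih => simp [pvGo, ih]

theorem pvFoldOffs (NV : List Int) (acc : List Int) (k : Int) :
    (NV.foldl (fun (st : List Int × Int) n => (st.1 ++ [st.2 + n], st.2 + n)) (acc, k)).1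
      = acc ++ pvOffs NV k := by
  induction NV generalizing acc k with
  | nil => simp [pvOffs]
  | cons n t ih => simp [pvOffs, ih]

theorem pvZipOffs (NC : List Int) (NV : List Int) (k : Int) :
    ((k :: (pvOffs NV k).dropLast).zip (pvOffs NV k)).map
        (fun p => PySem.List.slice NC (some p.1) (some p.2))
      = pvGo NC NV k := by
  induction NV generalizing k with
  | nil => simp [pvOffs, pvGo]
  | cons n t ih =>
    cases t with
    | nil => simp [pvOffs, pvGo]
    | cons m tt =>
      have h := ih (k + n)
      simp only [pvOffs, pvGo, List.dropLast_cons₂, List.zip_cons_cons, List.map_cons] at h ⊢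
      rw [h]

-- ===== VERDICT (by name: the statement is the Claim_ definition above) =====
theorem curvatureConversion_spec : Claim_equal_curvatureConversion := by
  intro NC NV _
  unfold Spec_curvatureConversion curvatureConversion curvatureConversion_alt
  rw [pvFoldA NC NV [] 0, pvFoldOffs NV [] 0]
  simp only [List.nil_append, PySem.List.slice_to_neg_one]
  exact (pvZipOffs NC NV 0).symm
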